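-- pv_equiv track=rewrite | github.com/JDPPEA/BlueRook | 3.8_c_p_m_[all-in]l.py | center_square
-- ===== SOURCE A (Python) =====
-- def center_square(cordonnate):
--         for value in square.values():
--             value_x = []
--             value_y = []
--             value_x.append(value[0])
--             if cordonnate[0]<= 95 + value[0] and cordonnate[0]>= 95 - value[0]:
--                 if cordonnate[1]<= 95 + value[1] and cordonnate[1]>= 95 - value[1]:
--                     return value #pas finis rajouter un prompteur pour la détection de case (non idéal)
--
-- square = {
--           "a8":(95,95),  "b8":(190,95),  "c8":(285,95),  "d8":(380,95),  "e8":(475,95),  "f8":(570,95),  "g8":(665,95),  "h8":(760,95),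
--           "a7":(95,190), "b7":(190,190), "c7":(285,190), "d7":(380,190), "e7":(475,190), "f7":(570,190), "g7":(665,190), "h7":(760,190),
--           "a6":(95,285), "b6":(190,285), "c6":(285,285), "d6":(380,285), "e6":(475,285), "f6":(570,285), "g6":(665,285), "h6":(760,285),
--           "a5":(95,380), "b5":(190,380), "c5":(285,380), "d5":(380,380), "e5":(475,380), "f5":(570,380), "g5":(665,380), "h5":(760,380),
--           "a4":(95,475), "b4":(190,475), "c4":(285,475), "d4":(380,475), "e4":(475,475), "f4":(570,475), "g4":(665,475), "h4":(760,475),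
--           "a3":(95,570), "b3":(190,570), "c3":(285,570), "d3":(380,570), "e3":(475,570), "f3":(570,570), "g3":(665,570), "h3":(760,570),
--           "a2":(95,665), "b2":(190,665), "c2":(285,665), "d2":(380,665), "e2":(475,665), "f2":(570,665), "g2":(665,665), "h2":(760,665),
--           "a1":(95,760), "b1":(190,760), "c1":(285,760), "d1":(380,760), "e1":(475,760), "f1":(570,760), "g1":(665,760), "h1":(760,760)
--           }
-- ===== SOURCE B (Python) =====
-- def center_square(cordonnate):
--     # closed form: nearest grid square center covering the offset from 95
--     dx = abs(cordonnate[0] - 95)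
--     dy = abs(cordonnate[1] - 95)
--     if dx > 760 or dy > 760:
--         return None
--     return (95 * max(1, (dx + 94) // 95), 95 * max(1, (dy + 94) // 95))
-- ===== Notes on version B (the rewrite author's own statement) =====
-- stated objective: simpler
-- what changed: Replaced the 64-entry dict scan with a closed-form computation: the first in-order match minimizes the y-grid coordinate then the x-grid coordinate, which equals 95*max(1, ceil(|c-95|/95)) per axis, with None exactly when an offset exceeds 760.
import Mathlib
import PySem

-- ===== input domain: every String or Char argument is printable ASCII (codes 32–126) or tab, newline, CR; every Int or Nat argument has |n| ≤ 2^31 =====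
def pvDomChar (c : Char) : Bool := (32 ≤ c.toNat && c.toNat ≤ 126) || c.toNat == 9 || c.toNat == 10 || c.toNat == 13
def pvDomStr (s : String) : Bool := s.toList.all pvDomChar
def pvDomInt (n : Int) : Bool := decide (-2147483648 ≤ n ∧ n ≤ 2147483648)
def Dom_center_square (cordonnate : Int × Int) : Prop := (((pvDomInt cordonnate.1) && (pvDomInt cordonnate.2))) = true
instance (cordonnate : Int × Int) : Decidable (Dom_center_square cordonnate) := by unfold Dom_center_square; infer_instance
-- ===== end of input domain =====

-- B replaces A's 64-entry dict scan with an O(1) closed form per axis (simpler).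


-- ===== PORT A =====
-- values of the module-level dict `square`, in insertion order
def squareValues : List (Int × Int) :=
  [(95,95),(190,95),(285,95),(380,95),(475,95),(570,95),(665,95),(760,95),
   (95,190),(190,190),(285,190),(380,190),(475,190),(570,190),(665,190),(760,190),
   (95,285),(190,285),(285,285),(380,285),(475,285),(570,285),(665,285),(760,285),
   (95,380),(190,380),(285,380),(380,380),(475,380),(570,380),(665,380),(760,380),
   (95,475),(190,475),(285,475),(380,475),(475,475),(570,475),(665,475),(760,475),
   (95,570),(190,570),(285,570),(380,570),(475,570),(570,570),(665,570),(760,570),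
   (95,665),(190,665),(285,665),(380,665),(475,665),(570,665),(665,665),(760,665),
   (95,760),(190,760),(285,760),(380,760),(475,760),(570,760),(665,760),(760,760)]

-- the for-loop of A (value_x/value_y are built but never read in A; they do not affect the result)
def centerLoop (cordonnate : Int × Int) : List (Int × Int) → Option (Int × Int)
  | [] => none
  | v :: rest =>
    if cordonnate.1 ≤ 95 + v.1 ∧ cordonnate.1 ≥ 95 - v.1 then
      if cordonnate.2 ≤ 95 + v.2 ∧ cordonnate.2 ≥ 95 - v.2 then some v
      else centerLoop cordonnate rest
    else centerLoop cordonnate rest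

def center_square (cordonnate : Int × Int) : Option (Int × Int) :=
  centerLoop cordonnate squareValues

-- ===== PORT B =====
def center_square_alt (cordonnate : Int × Int) : Option (Int × Int) :=
  let dx := |cordonnate.1 - 95|
  let dy := |cordonnate.2 - 95|
  if dx > 760 ∨ dy > 760 then none
  else some (95 * max 1 (PySem.Int.floordiv (dx + 94) 95),
             95 * max 1 (PySem.Int.floordiv (dy + 94) 95))

-- ===== PRECONDITION & SPEC =====
def Spec_center_square (cordonnate : Int × Int) (out : Option (Int × Int)) : Prop := out = center_square_alt cordonnate
instance (cordonnate : Int × Int) (out : Option (Int × Int)) : Decidable (Spec_center_square cordonnate out) := by unfold Spec_center_square; infer_instance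

-- ===== CLAIM (what is proved, stated in full; the proofs are below) =====
def Claim_equal_center_square : Prop := ∀ (cordonnate : Int × Int), Dom_center_square cordonnate → Spec_center_square cordonnate (center_square cordonnate)

-- ===== LEMMAS AND PROOFS =====

-- one row of the grid: x-centres 95..760 at a fixed y-centre vy
def rowL (vy : Int) : List (Int × Int) :=
  [(95,vy),(190,vy),(285,vy),(380,vy),(475,vy),(570,vy),(665,vy),(760,vy)]

set_option maxHeartbeats 1000000 in
lemma row_eval (x y vy : Int) (rest : List (Int × Int)) :
    centerLoop (x,y) (rowL vy ++ rest) =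
      if 95 - vy ≤ y ∧ y ≤ 95 + vy ∧ -665 ≤ x ∧ x ≤ 855 then
        some (95 * max 1 ((|x - 95| + 94) / 95), vy)
      else centerLoop (x,y) rest := by
  simp only [rowL, List.cons_append, List.nil_append, centerLoop]
  by_cases hy : y ≤ 95 + vy ∧ y ≥ 95 - vy
  · simp only [if_pos hy]
    rcases abs_cases (x - 95) with ⟨h1, h2⟩ | ⟨h1, h2⟩ <;> rw [h1] <;> split_ifs <;>
      first
        | rfl
        | (simp only [Option.some.injEq, Prod.mk.injEq, true_and, and_true]; omega)
        | (exfalso; omega)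
  · simp only [if_neg hy, ite_self]
    rw [if_neg (by omega : ¬(95 - vy ≤ y ∧ y ≤ 95 + vy ∧ -665 ≤ x ∧ x ≤ 855))]

lemma grid_decomp : squareValues =
    rowL 95 ++ (rowL 190 ++ (rowL 285 ++ (rowL 380 ++ (rowL 475 ++ (rowL 570 ++
      (rowL 665 ++ (rowL 760 ++ []))))))) := rfl

-- ===== VERDICT (by name: the statement is the Claim_ definition above) =====
set_option maxHeartbeats 1000000 in
theorem center_square_spec : Claim_equal_center_square := by
  intro c _
  obtain ⟨x, y⟩ := c
  unfold Spec_center_square center_square center_square_alt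
  dsimp only
  rw [grid_decomp, row_eval, row_eval, row_eval, row_eval, row_eval, row_eval,
      row_eval, row_eval]
  simp only [centerLoop]
  rcases abs_cases (x - 95) with ⟨h1, h2⟩ | ⟨h1, h2⟩ <;>
    rcases abs_cases (y - 95) with ⟨h3, h4⟩ | ⟨h3, h4⟩ <;> rw [h1, h3] <;>
    simp only [PySem.Int.floordiv_eq_ediv_of_pos (b := 95) (by norm_num : (0:Int) < 95)] <;>
    split_ifs <;>
    first
      | rfl
      | (simp only [Option.some.injEq, Prod.mk.injEq, true_and, and_true]; omega)
      | (exfalso; omega)
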